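-- pv_equiv track=rewrite | github.com/genjix/random | euler/pandigitalmult.py | computestr
-- ===== SOURCE A (Python) =====
-- import functools, itertools
--
-- def stopat(s):
--     if len(s) == 0:
--         yield "0"
--     elif s[-1] in ("x", "="):
--         yield s.pop()
--     else:
--         while len(s) > 0:
--             if s[-1] in ("x", "="):
--                 break
--             c = s.pop()
--             yield c
--
-- def tryconv(s):
--     if s in ("x", "="):
--         return s
--     return int(s)
--
-- def computestr(s):
--     s = list(s)
--     s.reverse()
--     expr = \
--             tryconv(functools.reduce(lambda x, y: x+y, stopat(s), "")),\
--             tryconv(functools.reduce(lambda x, y: x+y, stopat(s), "")),\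
--             tryconv(functools.reduce(lambda x, y: x+y, stopat(s), "")),\
--             tryconv(functools.reduce(lambda x, y: x+y, stopat(s), "")),\
--             tryconv(functools.reduce(lambda x, y: x+y, stopat(s), ""))
--
--     OP_A = 0
--     OP_MULT = 1
--     OP_B = 2
--     OP_EQ = 3
--     OP_RES = 4
--
--     reg, state = 0, OP_A
--     for evl in expr:
--         if evl == 0:
--             return False
--             break
--         if state == OP_A:
--             if evl in ("x", "="):
--                 return False
--                 break
--             state = OP_MULT
--             reg = evl
--         elif state == OP_MULT:
--             if evl != "x":
--                 return False
--                 break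
--             state = OP_B
--         elif state == OP_B:
--             if evl in ("x", "="):
--                 return False
--                 break
--             reg = reg * evl
--             state = OP_EQ
--         elif state == OP_EQ:
--             if evl != "=":
--                 return False
--                 break
--             state = OP_RES
--         elif state == OP_RES:
--             if evl in ("x", "="):
--                 return False
--                 break
--             reg = (reg == evl)
--     return reg
-- ===== SOURCE B (Python) =====
-- import itertools
--
-- def computestr(s):
--     # tokenize in one pass: each operator char is its own token, maximal
--     # runs of other chars are number tokens
--     toks = []
--     for isop, grp in itertools.groupby(s, key=lambda c: c in ("x", "=")):
--         if isop:
--             toks.extend(grp)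
--         else:
--             toks.append(''.join(grp))
--     toks = (toks + ["0"] * 5)[:5]
--     # convert all five up front (same ValueErrors as the original)
--     vals = [t if t in ("x", "=") else int(t) for t in toks]
--     a, op1, b, op2, c = vals
--     if any(v == 0 for v in vals):
--         return False
--     if a in ("x", "=") or op1 != "x":
--         return False
--     if b in ("x", "=") or op2 != "=":
--         return False
--     if c in ("x", "="):
--         return False
--     return a * b == c
-- ===== Notes on version B (the rewrite author's own statement) =====
-- stated objective: simpler
-- what changed: Replaced the reversed-list pop generator, per-token functools.reduce concatenation and explicit 5-state machine with a single itertools.groupby tokenization pass followed by direct positional validation of the five (padded) tokens.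
import Mathlib
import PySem

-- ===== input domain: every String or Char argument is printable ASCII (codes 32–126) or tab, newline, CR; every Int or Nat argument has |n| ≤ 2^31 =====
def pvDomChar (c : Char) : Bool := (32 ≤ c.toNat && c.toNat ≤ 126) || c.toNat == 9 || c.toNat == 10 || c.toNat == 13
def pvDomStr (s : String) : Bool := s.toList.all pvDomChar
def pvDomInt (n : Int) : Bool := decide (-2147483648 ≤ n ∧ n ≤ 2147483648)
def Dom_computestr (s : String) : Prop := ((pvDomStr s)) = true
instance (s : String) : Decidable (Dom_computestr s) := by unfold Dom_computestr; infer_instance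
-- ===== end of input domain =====

-- B replaces A's reversed-list generator + reduce-concatenation + explicit 5-state machine by a
-- single-pass groupby tokenizer and direct positional validation (objective: simpler, same cost).

-- the value of a converted token: the operator strings "x"/"=" kept as-is, anything else int()ed
inductive PyVal
  | vx
  | veq
  | num (n : Int)
deriving DecidableEq, Repr

-- `evl in ("x", "=")`
def isOpV : PyVal → Bool
  | .vx => true
  | .veq => true
  | .num _ => false

-- `evl == 0` (a string compares unequal to 0 in Python)
def isZeroV : PyVal → Bool
  | .num n => n == 0
  | _ => false

-- `c in ("x", "=")` on a single character
def isop (c : Char) : Bool := c == 'x' || c == '='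

-- ===== PORT A =====

-- the while-loop of `stopat`: pops chars off the END of the reversed list, concatenating the
-- yielded chars (the functools.reduce with "" start); stops at an operator or when empty
def stopatLoop (s : List Char) (acc : List Char) : List Char × List Char :=
  match h : s.getLast? with
  | none => (acc, s)
  | some c =>
    if isop c then (acc, s)
    else stopatLoop s.dropLast (acc ++ [c])
termination_by s.length
decreasing_by
  have hne : s ≠ [] := by intro hs; subst hs; simp at h
  have := List.length_pos_of_ne_nil hne
  simp [List.length_dropLast]; omega

-- one `reduce(+, stopat(s), "")`: the next token and the remaining (reversed) list
def stopatA (s : List Char) : List Char × List Char :=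
  match h : s.getLast? with
  | none => (['0'], s)                       -- len(s) == 0: yield "0"
  | some c =>
    if isop c then ([c], s.dropLast)         -- s[-1] in ("x","="): yield s.pop()
    else stopatLoop s []                     -- the while loop

-- tryconv; none = ValueError from int()
def tryconv (t : List Char) : Option PyVal :=
  if t = ['x'] then some .vx
  else if t = ['='] then some .veq
  else (PySem.Int.ofChars? t).map .num

-- the state machine: state 0..4 = OP_A, OP_MULT, OP_B, OP_EQ, OP_RES; reg carried as an Int
def runA : List PyVal → Int → Nat → Bool
  | [], _, _ => false                        -- unreachable: expr always has 5 elements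
  | evl :: rest, reg, state =>
    if isZeroV evl then false
    else if state = 0 then
      match evl with
      | .vx | .veq => false
      | .num n => runA rest n 1
    else if state = 1 then
      if evl ≠ .vx then false else runA rest reg 2
    else if state = 2 then
      match evl with
      | .vx | .veq => false
      | .num n => runA rest (reg * n) 3
    else if state = 3 then
      if evl ≠ .veq then false else runA rest reg 4
    else
      match evl with
      | .vx | .veq => false
      | .num n => decide (reg = n)           -- reg = (reg == evl); loop ends, reg returned

def computestr (s : String) : Bool :=
  let rev := (s.toList).reverse              -- s = list(s); s.reverse()
  let p1 := stopatA rev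
  let p2 := stopatA p1.2
  let p3 := stopatA p2.2
  let p4 := stopatA p3.2
  let p5 := stopatA p4.2
  match tryconv p1.1 with
  | none => false                            -- Python raises ValueError (outside Pre_)
  | some e1 =>
  match tryconv p2.1 with
  | none => false
  | some e2 =>
  match tryconv p3.1 with
  | none => false
  | some e3 =>
  match tryconv p4.1 with
  | none => false
  | some e4 =>
  match tryconv p5.1 with
  | none => false
  | some e5 => runA [e1, e2, e3, e4, e5] 0 0

-- ===== PORT B =====

-- the groupby loop: each operator char becomes its own token, a maximal run of other chars one token
def tokensB (s : List Char) : List (List Char) :=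
  match s with
  | [] => []
  | c :: t =>
    if isop c then [c] :: tokensB t
    else (c :: t.takeWhile (fun d => !isop d)) :: tokensB (t.dropWhile (fun d => !isop d))
termination_by s.length
decreasing_by
  · simp
  · have := List.length_dropWhile_le (fun d => !isop d) t
    simp; omega

-- the list comprehension's conversion: t if t in ("x","=") else int(t); none = ValueError
def convB (t : List Char) : Option PyVal :=
  if t = ['x'] ∨ t = ['='] then some (if t = ['x'] then .vx else .veq)
  else (PySem.Int.ofChars? t).map .num

def computestr_alt (s : String) : Bool :=
  let toks := (tokensB s.toList ++ [['0'], ['0'], ['0'], ['0'], ['0']]).take 5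
  match toks.map convB with
  | [some a, some o1, some b, some o2, some c] =>
    if [a, o1, b, o2, c].any isZeroV then false
    else if isOpV a || decide (o1 ≠ .vx) then false
    else if isOpV b || decide (o2 ≠ .veq) then false
    else if isOpV c then false
    else
      match a, b, c with
      | .num x, .num y, .num z => decide (x * y = z)
      | _, _, _ => false
  | _ => false                               -- Python raises ValueError here (outside Pre_)


-- ===== PRECONDITION & SPEC =====

-- an independent tokenizer for the precondition (must not reach either port)
def preTokensAux : List Char → List Char → List (List Char)
  | [], cur => if cur = [] then [] else [cur.reverse]
  | c :: t, cur =>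
    if c = 'x' ∨ c = '=' then
      (if cur = [] then [] else [cur.reverse]) ++ [c] :: preTokensAux t []
    else preTokensAux t (c :: cur)

def preTokens (s : List Char) : List (List Char) := preTokensAux s []

-- Pre_: each of the first five tokens (padded with "0") is "x", "=" or a valid int() literal;
-- exactly the inputs on which the Python A returns (no ValueError from int())
def Pre_computestr (s : String) : Prop :=
  ∀ t ∈ (preTokens s.toList ++ [['0'], ['0'], ['0'], ['0'], ['0']]).take 5,
    t = ['x'] ∨ t = ['='] ∨ (PySem.Int.ofChars? t).isSome

instance (s : String) : Decidable (Pre_computestr s) := by unfold Pre_computestr; infer_instance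

def pvWitness_computestr : String := "12x3=36"

def Spec_computestr (s : String) (out : Bool) : Prop := out = computestr_alt s
instance (s : String) (out : Bool) : Decidable (Spec_computestr s out) := by unfold Spec_computestr; infer_instance

-- ===== CLAIM (what is proved, stated in full; the proofs are below) =====
def Claim_equal_computestr : Prop := ∀ (s : String), Dom_computestr s → Pre_computestr s → Spec_computestr s (computestr s)

-- ===== LEMMAS AND PROOFS =====

-- the first token / the rest, read from the FRONT of the (unreversed) character list
def fTok : List Char → List Char
  | [] => ['0']
  | c :: t => if isop c then [c] else c :: t.takeWhile (fun d => !isop d)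

def fRest : List Char → List Char
  | [] => []
  | c :: t => if isop c then t else t.dropWhile (fun d => !isop d)

lemma stopatLoop_reverse (l : List Char) (acc : List Char) :
    stopatLoop l.reverse acc =
      (acc ++ l.takeWhile (fun d => !isop d), (l.dropWhile (fun d => !isop d)).reverse) := by
  induction l generalizing acc with
  | nil => simp [stopatLoop]
  | cons c t ih =>
    rw [stopatLoop]
    split
    · next h => simp at h
    · next c' h =>
      obtain rfl : c = c' := by simpa using h
      by_cases hc : isop c
      · simp [hc, List.takeWhile_cons, List.dropWhile_cons]
      · simp only [hc, Bool.false_eq_true, if_false, List.reverse_cons, List.dropLast_concat, ih,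
          List.takeWhile_cons, List.dropWhile_cons, Bool.not_false, if_true, List.append_assoc,
          List.singleton_append]

lemma stopatA_reverse (l : List Char) :
    stopatA l.reverse = (fTok l, (fRest l).reverse) := by
  cases l with
  | nil => simp [stopatA, fTok, fRest]
  | cons c t =>
    rw [stopatA]
    split
    · next h => simp at h
    · next c' h =>
      obtain rfl : c = c' := by simpa using h
      by_cases hc : isop c
      · simp [hc, fTok, fRest]
      · rw [stopatLoop_reverse (c :: t) []]
        simp [hc, fTok, fRest, List.takeWhile_cons, List.dropWhile_cons]

lemma tokensB_cons (c : Char) (t : List Char) :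
    tokensB (c :: t) = fTok (c :: t) :: tokensB (fRest (c :: t)) := by
  rw [tokensB]
  by_cases hc : isop c <;> simp [hc, fTok, fRest]

lemma fRest_iterate_nil (i : Nat) : fRest^[i] ([] : List Char) = [] :=
  Function.iterate_fixed rfl i

lemma toksTake (n : Nat) : ∀ (l : List Char) (pad : List (List Char)),
    (∀ x ∈ pad, x = ['0']) → n ≤ (tokensB l).length + pad.length →
    (tokensB l ++ pad).take n = (List.range n).map (fun i => fTok (fRest^[i] l)) := by
  induction n with
  | zero => intro l pad _ _; simp
  | succ n ih =>
    intro l pad hpad hlen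
    cases l with
    | nil =>
      have htb : tokensB [] = [] := by rw [tokensB]
      rw [htb] at hlen ⊢
      simp only [List.nil_append, List.length_nil, Nat.zero_add] at hlen ⊢
      have h1 : (List.range (n + 1)).map (fun i => fTok (fRest^[i] ([] : List Char))) =
          List.replicate (n + 1) ['0'] := by
        have : ∀ i, fTok (fRest^[i] ([] : List Char)) = ['0'] := by
          intro i; rw [fRest_iterate_nil]; rfl
        simp [this]
      rw [h1]
      refine List.eq_replicate_iff.mpr ⟨?_, ?_⟩
      · rw [List.length_take]; omega
      · intro b hb; exact hpad b (List.mem_of_mem_take hb)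
    | cons c t =>
      rw [tokensB_cons, List.cons_append, List.take_succ_cons]
      rw [ih (fRest (c :: t)) pad hpad (by
        simp only [tokensB_cons, List.length_cons] at hlen; omega)]
      rw [List.range_succ_eq_map, List.map_cons, List.map_map]
      simp [Function.iterate_succ_apply]

lemma toks5_eq (l : List Char) :
    (tokensB l ++ [['0'], ['0'], ['0'], ['0'], ['0']]).take 5 =
      [fTok l, fTok (fRest l), fTok (fRest (fRest l)), fTok (fRest (fRest (fRest l))),
       fTok (fRest (fRest (fRest (fRest l))))] := by
  rw [toksTake 5 l _ (by intro x hx; fin_cases hx <;> rfl)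
      (by simp only [List.length_cons, List.length_nil]; omega)]
  rfl

lemma conv_eq (t : List Char) : convB t = tryconv t := by
  unfold convB tryconv
  by_cases h1 : t = ['x'] <;> by_cases h2 : t = ['='] <;> simp [h1, h2]

lemma run_eq_check (e0 e1 e2 e3 e4 : PyVal) :
    runA [e0, e1, e2, e3, e4] 0 0 =
      (if [e0, e1, e2, e3, e4].any isZeroV then false
       else if isOpV e0 || decide (e1 ≠ .vx) then false
       else if isOpV e2 || decide (e3 ≠ .veq) then false
       else if isOpV e4 then false
       else
         match e0, e2, e4 with
         | .num x, .num y, .num z => decide (x * y = z)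
         | _, _, _ => false) := by
  cases e0 <;> cases e1 <;> cases e2 <;> cases e3 <;> cases e4 <;>
    simp [runA, isZeroV, isOpV, Bool.and_assoc] <;> (try split_ifs <;> simp_all)

lemma computestr_eq_alt (s : String) : computestr s = computestr_alt s := by
  simp only [computestr, computestr_alt, stopatA_reverse, toks5_eq, conv_eq,
    List.map_cons, List.map_nil]
  cases h0 : tryconv (fTok s.toList) <;>
    cases h1 : tryconv (fTok (fRest s.toList)) <;>
      cases h2 : tryconv (fTok (fRest (fRest s.toList))) <;>
        cases h3 : tryconv (fTok (fRest (fRest (fRest s.toList)))) <;>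
          cases h4 : tryconv (fTok (fRest (fRest (fRest (fRest s.toList))))) <;>
            simp [run_eq_check]

-- ===== VERDICT (by name: the statement is the Claim_ definition above) =====
theorem computestr_spec : Claim_equal_computestr := by
  intro s _ _
  unfold Spec_computestr
  exact computestr_eq_alt s
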